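-- pv_equiv track=rewrite | github.com/davityourway/Possible-States | dpwinstates.py | win_positions
-- ===== SOURCE A (Python) =====
-- def win_positions(m: int, n: int, k: int):
--     total = 0
--     for i in range(m):
--         for j in range(n):
--             if (i + k - 1) < m:
--                 total += 1
--                 if (j + k - 1) < n:
--                     total += 1
--             if (j + k - 1) < n:
--                 total += 1
--                 if (i - k + 1) >= 0:
--                     total += 1
--     return total
-- ===== SOURCE B (Python) =====
-- def win_positions(m: int, n: int, k: int):
--     # closed form: count rows/columns satisfying each window condition once,
--     # then combine by independence of the row and column conditions
--     mm = max(m, 0)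
--     nn = max(n, 0)
--     a = min(max(m - k + 1, 0), mm)   # rows i with i + k - 1 < m  (= rows with i - k + 1 >= 0)
--     c = min(max(n - k + 1, 0), nn)   # cols j with j + k - 1 < n
--     return a * nn + c * mm + 2 * a * c
-- ===== Notes on version B (the rewrite author's own statement) =====
-- stated objective: faster
-- what changed: Replaces the m*n double loop with an O(1) closed form: the counts of rows/columns satisfying each window condition are clamped linear expressions, and the total is a*nn + c*mm + 2*a*c.
import Mathlib
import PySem

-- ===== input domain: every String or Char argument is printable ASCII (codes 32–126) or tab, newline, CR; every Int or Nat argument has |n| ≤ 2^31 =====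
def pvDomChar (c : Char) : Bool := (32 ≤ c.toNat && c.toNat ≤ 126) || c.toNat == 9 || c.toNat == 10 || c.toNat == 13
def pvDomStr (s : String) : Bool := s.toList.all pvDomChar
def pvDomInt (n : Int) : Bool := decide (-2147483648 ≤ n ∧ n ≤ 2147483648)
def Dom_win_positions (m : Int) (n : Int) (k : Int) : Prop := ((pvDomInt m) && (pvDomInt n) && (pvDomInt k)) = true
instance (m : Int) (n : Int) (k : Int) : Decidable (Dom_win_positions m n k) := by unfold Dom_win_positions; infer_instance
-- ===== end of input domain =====

-- B replaces A's O(m·n) double loop by an O(1) closed form built from the counts of rows/columns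
-- satisfying each window condition (objective: faster, asymptotic).

-- ===== PORT A =====
def win_positions (m : Int) (n : Int) (k : Int) : Int :=
  (PySem.List.pyRange 0 m 1).foldl (fun total i =>
    (PySem.List.pyRange 0 n 1).foldl (fun total j =>
      let total := if i + k - 1 < m then
          (if j + k - 1 < n then (total + 1) + 1 else total + 1)
        else total
      if j + k - 1 < n then
          (if i - k + 1 ≥ 0 then (total + 1) + 1 else total + 1)
        else total) total) 0

-- ===== PORT B =====
def win_positions_alt (m : Int) (n : Int) (k : Int) : Int :=
  let mm := max m 0
  let nn := max n 0
  let a := min (max (m - k + 1) 0) mm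
  let c := min (max (n - k + 1) 0) nn
  a * nn + c * mm + 2 * a * c

-- ===== PRECONDITION & SPEC =====
def Spec_win_positions (m : Int) (n : Int) (k : Int) (out : Int) : Prop := out = win_positions_alt m n k
instance (m : Int) (n : Int) (k : Int) (out : Int) : Decidable (Spec_win_positions m n k out) := by unfold Spec_win_positions; infer_instance

-- ===== CLAIM (what is proved, stated in full; the proofs are below) =====
def Claim_equal_win_positions : Prop := ∀ (m : Int) (n : Int) (k : Int), Dom_win_positions m n k → Spec_win_positions m n k (win_positions m n k)

-- ===== LEMMAS AND PROOFS =====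

/-- number of indices in `range(n)` satisfying a one-sided window condition -/
def clampCnt (n k : Int) : Int := min (max (n - k + 1) 0) (max n 0)

lemma countP_range_lt (n k : Int) (N : Nat) :
    (((List.range N).countP (fun t : Nat => decide ((0:Int) + (t:Int) + k - 1 < n))) : Int)
      = min (max (n - k + 1) 0) (N : Int) := by
  induction N with
  | zero => simp
  | succ N ih =>
    rw [List.range_succ, List.countP_append]
    by_cases h : (0:Int) + (N:Int) + k - 1 < n <;>
      simp only [List.countP_cons, List.countP_nil, h, decide_true, decide_false] <;>
      push_cast <;> omega

lemma countP_range_ge (k : Int) (N : Nat) :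
    (((List.range N).countP (fun t : Nat => decide ((0:Int) + (t:Int) - k + 1 ≥ 0))) : Int)
      = min (max ((N : Int) - k + 1) 0) (N : Int) := by
  induction N with
  | zero => simp
  | succ N ih =>
    rw [List.range_succ, List.countP_append]
    by_cases h : (0:Int) + (N:Int) - k + 1 ≥ 0 <;>
      simp only [List.countP_cons, List.countP_nil, h, decide_true, decide_false] <;>
      push_cast <;> omega

lemma cnt_lt (n k : Int) :
    (((PySem.List.pyRange 0 n 1).countP (fun j => decide (j + k - 1 < n))) : Int) = clampCnt n k := by
  rw [PySem.List.pyRange_one, List.countP_map]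
  have h := countP_range_lt n k (n - 0).toNat
  simp only [Function.comp_def] at h ⊢
  rw [h]; unfold clampCnt; omega

lemma cnt_ge (m k : Int) :
    (((PySem.List.pyRange 0 m 1).countP (fun i => decide (i - k + 1 ≥ 0))) : Int) = clampCnt m k := by
  rw [PySem.List.pyRange_one, List.countP_map]
  have h := countP_range_ge k (m - 0).toNat
  simp only [Function.comp_def] at h ⊢
  rw [h]; unfold clampCnt; omega

lemma sum_ite (P : Int → Prop) [DecidablePred P] (A0 B0 : Int) (xs : List Int) :
    (xs.map (fun j => A0 + if P j then B0 else 0)).sum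
      = (xs.length : Int) * A0 + B0 * ((xs.countP (fun j => decide (P j))) : Int) := by
  induction xs with
  | nil => simp
  | cons x xs ih =>
    by_cases h : P x <;>
      simp only [List.map_cons, List.sum_cons, List.countP_cons, List.length_cons, h,
        decide_true, decide_false, if_true, if_false, ih] <;> push_cast <;> ring

lemma sum_ite2 (P Q : Int → Prop) [DecidablePred P] [DecidablePred Q] (A0 B0 C0 : Int) (xs : List Int) :
    (xs.map (fun i => A0 + (if P i then B0 else 0) + (if Q i then C0 else 0))).sum
      = (xs.length : Int) * A0 + B0 * ((xs.countP (fun i => decide (P i))) : Int)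
          + C0 * ((xs.countP (fun i => decide (Q i))) : Int) := by
  induction xs with
  | nil => simp
  | cons x xs ih =>
    by_cases h : P x <;> by_cases h' : Q x <;>
      simp only [List.map_cons, List.sum_cons, List.countP_cons, List.length_cons, h, h',
        decide_true, decide_false, if_true, if_false, ih] <;> push_cast <;> ring

lemma inner_eq (m n k i total : Int) :
    ((PySem.List.pyRange 0 n 1).foldl (fun total j =>
        let total := if i + k - 1 < m then
            (if j + k - 1 < n then (total + 1) + 1 else total + 1)
          else total
        if j + k - 1 < n then
            (if i - k + 1 ≥ 0 then (total + 1) + 1 else total + 1)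
          else total) total)
      = total + (clampCnt n k + (if i + k - 1 < m then (max n 0 + clampCnt n k) else 0)
          + (if i - k + 1 ≥ 0 then clampCnt n k else 0)) := by
  rw [PySem.List.foldl_congr_mem _ _
      (fun total j => total + ((if i + k - 1 < m then 1 else 0)
        + if j + k - 1 < n then (1 + (if i + k - 1 < m then 1 else 0)
            + (if i - k + 1 ≥ 0 then 1 else 0)) else 0)) _
      (by intro acc x _
          by_cases h1 : i + k - 1 < m <;> by_cases h2 : x + k - 1 < n <;>
            by_cases h3 : i - k + 1 ≥ 0 <;> simp [h1, h2, h3] <;> omega)]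
  rw [PySem.List.foldl_add, sum_ite (fun j => j + k - 1 < n), cnt_lt,
    PySem.List.length_pyRange_one]
  have hn : (((n - 0).toNat : Nat) : Int) = max n 0 := by omega
  rw [hn]
  split_ifs <;> ring

theorem win_positions_eq (m n k : Int) : win_positions m n k = win_positions_alt m n k := by
  unfold win_positions
  rw [PySem.List.foldl_congr_mem _ _
      (fun total i => total + (clampCnt n k + (if i + k - 1 < m then (max n 0 + clampCnt n k) else 0)
          + (if i - k + 1 ≥ 0 then clampCnt n k else 0))) _
      (by intro acc x _; exact inner_eq m n k x acc)]
  rw [PySem.List.foldl_add, sum_ite2 (fun i => i + k - 1 < m) (fun i => i - k + 1 ≥ 0),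
    cnt_lt, cnt_ge, PySem.List.length_pyRange_one]
  have hm : (((m - 0).toNat : Nat) : Int) = max m 0 := by omega
  rw [hm]
  unfold win_positions_alt clampCnt
  ring

-- ===== VERDICT (by name: the statement is the Claim_ definition above) =====
theorem win_positions_spec : Claim_equal_win_positions := by
  intro m n k _
  unfold Spec_win_positions
  exact win_positions_eq m n k
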